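-- pv_equiv track=rewrite | github.com/PK-124960/Compliance_Checking4Intern | scripts/generate_test_data.py | format_entity_ttl
-- ===== SOURCE A (Python) =====
-- def format_entity_ttl(entity_id: str, rdf_type: str, label: str,
--                       properties: dict) -> str:
--     """Format a single entity as Turtle RDF."""
--     lines = [f'ait:{entity_id} a {rdf_type} ;']
--     lines.append(f'    rdfs:label "{label}" ;')
--
--     prop_lines = []
--     for prop, (value, dtype) in sorted(properties.items()):
--         if dtype == 'boolean':
--             prop_lines.append(f'    {prop} {value}')
--         elif dtype == 'integer':
--             prop_lines.append(f'    {prop} {value}')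
--         else:
--             prop_lines.append(f'    {prop} "{value}"')
--
--     if prop_lines:
--         lines.append(' ;\n'.join(prop_lines) + ' .')
--     else:
--         # No properties — close with period
--         lines[-1] = lines[-1].rstrip(' ;') + ' .'
--
--     return '\n'.join(lines)
-- ===== SOURCE B (Python) =====
-- def format_entity_ttl(entity_id: str, rdf_type: str, label: str,
--                       properties: dict) -> str:
--     """Format a single entity as Turtle RDF, building the output back-to-front:
--     start from the terminator ' .' and prepend one ' ;\\n    '-prefixed segment
--     per property (walking them in reverse sorted order) — no line list, no
--     join, no empty-properties special case."""
--     out = ' .'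
--     for prop, (value, dtype) in reversed(sorted(properties.items())):
--         obj = value if dtype in ('boolean', 'integer') else f'"{value}"'
--         out = f' ;\n    {prop} {obj}' + out
--     return f'ait:{entity_id} a {rdf_type} ;\n    rdfs:label "{label}"' + out
-- ===== Notes on version B (the rewrite author's own statement) =====
-- stated objective: alternative
-- what changed: B builds the output back-to-front: starting from the terminator ' .' it prepends one ' ;\n '-prefixed predicate-object segment per property while walking reversed(sorted(items)), then prepends the fixed head, eliminating A's line list, its two joins and its empty-properties rstrip branch.
import Mathlib
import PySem

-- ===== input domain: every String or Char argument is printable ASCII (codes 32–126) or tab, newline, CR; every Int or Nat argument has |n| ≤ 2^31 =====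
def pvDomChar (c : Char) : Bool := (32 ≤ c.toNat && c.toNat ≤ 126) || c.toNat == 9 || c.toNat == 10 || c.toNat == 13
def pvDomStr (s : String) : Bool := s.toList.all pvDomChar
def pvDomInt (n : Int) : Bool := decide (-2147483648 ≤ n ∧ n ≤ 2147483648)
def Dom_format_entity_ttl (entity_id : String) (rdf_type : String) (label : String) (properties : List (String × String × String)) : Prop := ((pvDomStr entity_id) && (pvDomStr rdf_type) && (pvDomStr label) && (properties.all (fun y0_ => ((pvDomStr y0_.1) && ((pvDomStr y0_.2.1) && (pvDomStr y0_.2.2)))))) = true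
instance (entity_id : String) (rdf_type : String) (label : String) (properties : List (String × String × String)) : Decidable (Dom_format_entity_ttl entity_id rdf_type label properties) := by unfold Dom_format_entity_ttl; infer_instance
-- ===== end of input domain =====

-- B builds the output back-to-front: it starts from the terminator " ." and prepends one
-- " ;\n    "-prefixed segment per property in reverse sorted order — no line list, no join,
-- no empty-properties rstrip branch (objective: alternative decomposition).

-- ===== PORT A =====
-- s.rstrip(' ;') ported by hand (PySem has no right-strip with a char-set argument):
-- drop from the right every char in the set — exact Python semantics.
def pyRstripSet (s : String) (chars : List Char) : String :=
  String.ofList ((s.toList.reverse.dropWhile (fun c => c ∈ chars)).reverse)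

def format_entity_ttl (entity_id : String) (rdf_type : String) (label : String) (properties : List (String × String × String)) : String :=
  let lines : List String := ["ait:" ++ entity_id ++ " a " ++ rdf_type ++ " ;"]
  let lines := lines ++ ["    rdfs:label \"" ++ label ++ "\" ;"]
  -- sorted(properties.items()): a dict has distinct keys, so Python's tuple sort is
  -- the stable sort by the key component
  let prop_lines : List String :=
    (PySem.List.sorted properties (fun p => p.1) false).foldl
      (fun acc p =>
        if p.2.2 == "boolean" then acc ++ ["    " ++ p.1 ++ " " ++ p.2.1]
        else if p.2.2 == "integer" then acc ++ ["    " ++ p.1 ++ " " ++ p.2.1]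
        else acc ++ ["    " ++ p.1 ++ " \"" ++ p.2.1 ++ "\""]) []
  let lines :=
    if prop_lines ≠ [] then
      lines ++ [PySem.Str.join " ;\n" prop_lines ++ " ."]
    else
      -- lines[-1] = lines[-1].rstrip(' ;') + ' .'
      lines.dropLast ++ [pyRstripSet lines.getLast! [' ', ';'] ++ " ."]
  PySem.Str.join "\n" lines

-- ===== PORT B =====
def format_entity_ttl_alt (entity_id : String) (rdf_type : String) (label : String) (properties : List (String × String × String)) : String :=
  let out := " ."
  -- for … in reversed(sorted(properties.items())): out = segment + out
  let out := (PySem.List.sorted properties (fun p => p.1) false).reverse.foldl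
    (fun acc p =>
      " ;\n    " ++ p.1 ++ " " ++
        (if p.2.2 == "boolean" || p.2.2 == "integer" then p.2.1
         else "\"" ++ p.2.1 ++ "\"") ++ acc) out
  "ait:" ++ entity_id ++ " a " ++ rdf_type ++ " ;\n    rdfs:label \"" ++ label ++ "\"" ++ out

-- ===== PRECONDITION & SPEC =====
def Spec_format_entity_ttl (entity_id : String) (rdf_type : String) (label : String) (properties : List (String × String × String)) (out : String) : Prop := out = format_entity_ttl_alt entity_id rdf_type label properties
instance (entity_id : String) (rdf_type : String) (label : String) (properties : List (String × String × String)) (out : String) : Decidable (Spec_format_entity_ttl entity_id rdf_type label properties out) := by unfold Spec_format_entity_ttl; infer_instance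

-- ===== CLAIM (what is proved, stated in full; the proofs are below) =====
def Claim_equal_format_entity_ttl : Prop := ∀ (entity_id : String) (rdf_type : String) (label : String) (properties : List (String × String × String)), Dom_format_entity_ttl entity_id rdf_type label properties → Spec_format_entity_ttl entity_id rdf_type label properties (format_entity_ttl entity_id rdf_type label properties)

-- ===== LEMMAS AND PROOFS =====

-- the unindented predicate-object clause, as characters
def pvClauseC (p : String × String × String) : List Char :=
  p.1.toList ++ [' '] ++
    (if p.2.2 == "boolean" || p.2.2 == "integer" then p.2.1.toList
     else '"' :: p.2.1.toList ++ ['"'])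

lemma tailB_chars (l : List (String × String × String)) :
    (l.reverse.foldl
      (fun acc p =>
        " ;\n    " ++ p.1 ++ " " ++
          (if p.2.2 == "boolean" || p.2.2 == "integer" then p.2.1
           else "\"" ++ p.2.1 ++ "\"") ++ acc) (" ." : String)).toList =
      l.foldr (fun p acc => [' ', ';', '\n', ' ', ' ', ' ', ' '] ++ pvClauseC p ++ acc)
        [' ', '.'] := by
  rw [List.foldl_reverse]
  induction l with
  | nil => decide
  | cons p rest ih =>
      rw [List.foldr_cons, List.foldr_cons, ← ih]
      have hs : (" ;\n    " : String).toList = [' ', ';', '\n', ' ', ' ', ' ', ' '] := by decide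
      have h1 : (" " : String).toList = [' '] := by decide
      have h2 : ("\"" : String).toList = ['"'] := by decide
      by_cases h : p.2.2 == "boolean" || p.2.2 == "integer" <;>
        simp [pvClauseC, h, String.toList_append, hs, h1, h2, List.append_assoc]

lemma aFold_eq_map (ps : List (String × String × String)) :
    ps.foldl
      (fun acc p =>
        if p.2.2 == "boolean" then acc ++ ["    " ++ p.1 ++ " " ++ p.2.1]
        else if p.2.2 == "integer" then acc ++ ["    " ++ p.1 ++ " " ++ p.2.1]
        else acc ++ ["    " ++ p.1 ++ " \"" ++ p.2.1 ++ "\""]) [] =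
    ps.map (fun p => "    " ++ String.ofList (pvClauseC p)) := by
  have h : (fun (acc : List String) (p : String × String × String) =>
        if p.2.2 == "boolean" then acc ++ ["    " ++ p.1 ++ " " ++ p.2.1]
        else if p.2.2 == "integer" then acc ++ ["    " ++ p.1 ++ " " ++ p.2.1]
        else acc ++ ["    " ++ p.1 ++ " \"" ++ p.2.1 ++ "\""]) =
      (fun acc p => acc ++ [(fun q => "    " ++ String.ofList (pvClauseC q)) p]) := by
    funext acc p
    have hq : ∀ q : String × String × String,
        "    " ++ String.ofList (pvClauseC q) =
          (if q.2.2 == "boolean" || q.2.2 == "integer"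
           then "    " ++ q.1 ++ " " ++ q.2.1
           else "    " ++ q.1 ++ " \"" ++ q.2.1 ++ "\"") := by
      intro q
      by_cases h2 : q.2.2 == "boolean" || q.2.2 == "integer" <;>
        · simp only [pvClauseC, h2]
          apply String.toList_inj.mp
          simp [String.toList_append, String.toList_ofList]
    have hqp := hq p
    by_cases hb : p.2.2 == "boolean" <;> by_cases hi : p.2.2 == "integer" <;>
      simp [hb, hi, hqp]
  rw [h, PySem.List.foldl_append_singleton_eq_map]
  simp

lemma join_indent_tail (x : List Char) (t : List (String × String × String)) :
    PySem.Chars.join (" ;\n" : String).toList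
        ((("    " : String).toList ++ x) ::
          t.map (fun p => ("    " : String).toList ++ pvClauseC p)) ++ [' ', '.'] =
    ("    " : String).toList ++ x ++
      t.foldr (fun p acc => [' ', ';', '\n', ' ', ' ', ' ', ' '] ++ pvClauseC p ++ acc)
        [' ', '.'] := by
  induction t generalizing x with
  | nil => simp [PySem.Chars.join_singleton]
  | cons y r ih =>
      rw [List.map_cons, PySem.Chars.join_cons_cons, List.foldr_cons]
      have := ih (pvClauseC y)
      have hsep : (" ;\n" : String).toList = [' ', ';', '\n'] := by decide
      simp only [List.append_assoc] at *
      rw [hsep] at *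
      simp only [List.cons_append, List.nil_append] at *
      rw [this]
      have h6 : ("    " : String).toList = [' ', ' ', ' ', ' '] := by decide
      simp [h6]

lemma rstrip_label (label : String) :
    pyRstripSet ("    rdfs:label \"" ++ label ++ "\" ;") [' ', ';'] =
    "    rdfs:label \"" ++ label ++ "\"" := by
  apply String.toList_inj.mp
  simp only [pyRstripSet, String.toList_ofList, String.toList_append]
  have h1 : ("\" ;" : String).toList = ['"', ' ', ';'] := by decide
  have h2 : ("\"" : String).toList = ['"'] := by decide
  rw [h1, h2]
  simp [List.reverse_append, List.dropWhile]

theorem format_entity_ttl_spec : Claim_equal_format_entity_ttl := by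
  intro entity_id rdf_type label properties _
  show format_entity_ttl entity_id rdf_type label properties =
    format_entity_ttl_alt entity_id rdf_type label properties
  simp only [format_entity_ttl, format_entity_ttl_alt, aFold_eq_map]
  apply String.toList_inj.mp
  cases hps : PySem.List.sorted properties (fun p => p.1) false with
  | nil =>
      have hred : (["ait:" ++ entity_id ++ " a " ++ rdf_type ++ " ;"] ++
          ["    rdfs:label \"" ++ label ++ "\" ;"] : List String).getLast! =
          "    rdfs:label \"" ++ label ++ "\" ;" := rfl
      simp only [List.map_nil, ne_eq, not_true_eq_false, if_false]
      rw [hred, rstrip_label]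
      simp only [List.cons_append, List.nil_append, List.dropLast, List.reverse_nil, List.foldl_nil]
      simp only [PySem.Str.toList_join, List.map_cons, List.map_nil, String.toList_append]
      rw [PySem.Chars.join_cons_cons, PySem.Chars.join_singleton]
      have l1 : ("\n" : String).toList = ['\n'] := by decide
      have l2 : (" ;\n    rdfs:label \"" : String).toList =
          [' ', ';', '\n', ' ', ' ', ' ', ' ', 'r','d','f','s',':','l','a','b','e','l',' ','"'] := by decide
      have l3 : (" ;" : String).toList = [' ', ';'] := by decide
      have l4 : ("    rdfs:label \"" : String).toList =
          [' ',' ',' ',' ','r','d','f','s',':','l','a','b','e','l',' ','"'] := by decide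
      have l5 : ("\"" : String).toList = ['"'] := by decide
      have l6 : (" ." : String).toList = [' ','.'] := by decide
      simp [l1, l2, l3, l4, l5, l6, List.append_assoc]
  | cons x t =>
      simp only [List.map_cons, ne_eq, reduceCtorEq, not_false_eq_true, if_true,
        List.cons_append, List.nil_append]
      simp only [PySem.Str.toList_join, List.map_cons, List.map_nil, List.map_map,
        String.toList_append]
      rw [tailB_chars]
      rw [PySem.Chars.join_cons_cons, PySem.Chars.join_cons_cons,
        PySem.Chars.join_singleton]
      have hcomp : (String.toList ∘ fun (p : String × String × String) =>
            "    " ++ String.ofList (pvClauseC p)) =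
          (fun p => ("    " : String).toList ++ pvClauseC p) := by
        funext p; simp [String.toList_append, String.toList_ofList]
      rw [hcomp]
      simp only [String.toList_ofList]
      have hj := join_indent_tail (pvClauseC x) t
      have m1 : ("\n" : String).toList = ['\n'] := by decide
      have m2 : (" ;\n    rdfs:label \"" : String).toList =
          [' ', ';', '\n', ' ', ' ', ' ', ' ', 'r','d','f','s',':','l','a','b','e','l',' ','"'] := by decide
      have m3 : (" ;" : String).toList = [' ', ';'] := by decide
      have m4 : ("    rdfs:label \"" : String).toList =
          [' ',' ',' ',' ','r','d','f','s',':','l','a','b','e','l',' ','"'] := by decide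
      have m5 : ("\"" : String).toList = ['"'] := by decide
      have m6 : ("    " : String).toList = [' ',' ',' ',' '] := by decide
      have m7 : (" ." : String).toList = [' ','.'] := by decide
      simp only [List.append_assoc] at hj ⊢
      rw [m7, hj]
      simp [m1, m2, m3, m4, m5, m6, List.foldr_cons]
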